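-- pv_equiv track=rewrite | github.com/jclements3/trefoil | handout/trefoil_midi.py | chord_midi_notes
-- ===== SOURCE A (Python) =====
-- SCALE = ['C','D','E','F','G','A','B']
--
-- NOTE_BASE = {'C':0,'D':2,'E':4,'F':5,'G':7,'A':9,'B':11}
--
-- def note_midi(letter, octave):
--     return (octave+1)*12 + NOTE_BASE[letter]
--
-- def assign_octaves(notes, base_octave=3):
--     octaves=[]; octave=base_octave; prev_idx=-1
--     for note in notes:
--         idx = SCALE.index(note)
--         if prev_idx != -1 and idx <= prev_idx:
--             octave += 1
--         octaves.append((note, octave))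
--         prev_idx = idx
--     return octaves
--
-- def chord_midi_notes(lh_notes, rh_notes, trans=None):
--     lh = [trans[n] for n in lh_notes] if trans else list(lh_notes)
--     rh = [trans[n] for n in rh_notes] if trans else list(rh_notes)
--     lh_oct = assign_octaves(lh, base_octave=3)
--     last_lh_note, last_lh_oct = lh_oct[-1]
--     first_rh_idx = SCALE.index(rh[0])
--     last_lh_idx  = SCALE.index(last_lh_note)
--     rh_base = last_lh_oct if first_rh_idx > last_lh_idx else last_lh_oct + 1
--     rh_oct = assign_octaves(rh, base_octave=rh_base)
--     return [note_midi(n, o) for n, o in lh_oct + rh_oct]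
-- ===== SOURCE B (Python) =====
-- SCALE = ['C','D','E','F','G','A','B']
--
-- NOTE_BASE = {'C':0,'D':2,'E':4,'F':5,'G':7,'A':9,'B':11}
--
-- def chord_midi_notes(lh_notes, rh_notes, trans=None):
--     notes = list(lh_notes) + list(rh_notes)
--     if trans:
--         notes = [trans[n] for n in notes]
--     out = []
--     octave = 3
--     prev_idx = -1
--     for note in notes:
--         idx = SCALE.index(note)
--         if prev_idx != -1 and idx <= prev_idx:
--             octave += 1
--         out.append((octave + 1) * 12 + NOTE_BASE[note])
--         prev_idx = idx
--     return out
-- ===== Notes on version B (the rewrite author's own statement) =====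
-- stated objective: simpler
-- what changed: B fuses A's two assign_octaves passes, the lh_oct[-1]/rh[0] inspection and the rh_base branch into a single octave-assignment loop over lh+rh (the lh-to-rh transition is the same bump rule), emitting MIDI numbers directly instead of building (note, octave) pair lists first.
import Mathlib
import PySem

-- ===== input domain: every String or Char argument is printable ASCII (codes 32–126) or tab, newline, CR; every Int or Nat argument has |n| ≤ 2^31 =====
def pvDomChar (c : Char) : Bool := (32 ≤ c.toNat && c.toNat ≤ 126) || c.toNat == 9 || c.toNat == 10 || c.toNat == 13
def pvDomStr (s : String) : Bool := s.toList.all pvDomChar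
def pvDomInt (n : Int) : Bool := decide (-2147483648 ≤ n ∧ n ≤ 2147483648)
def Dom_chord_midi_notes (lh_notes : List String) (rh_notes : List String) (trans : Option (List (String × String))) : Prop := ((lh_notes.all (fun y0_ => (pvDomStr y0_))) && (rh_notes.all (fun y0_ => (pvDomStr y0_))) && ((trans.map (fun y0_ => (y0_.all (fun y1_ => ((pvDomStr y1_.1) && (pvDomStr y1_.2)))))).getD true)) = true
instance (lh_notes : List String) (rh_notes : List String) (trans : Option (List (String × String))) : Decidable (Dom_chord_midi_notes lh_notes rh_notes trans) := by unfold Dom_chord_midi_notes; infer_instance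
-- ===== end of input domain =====

-- B fuses the two assign_octaves passes and the rh_base branch into ONE octave-assignment
-- pass over lh+rh (the lh→rh transition is the same bump rule), emitting MIDI numbers directly.
-- Equivalence of RETURN values is claimed on Pre_ (nonempty hands, all translated notes valid).

-- module constants (shared by both ports, as in the Python module)
def SCALE : List String := ["C","D","E","F","G","A","B"]
def NOTE_BASE : PySem.Dict String Int :=
  PySem.Dict.ofList [("C",0),("D",2),("E",4),("F",5),("G",7),("A",9),("B",11)]
-- SCALE.index(note); under Pre_ the note is in SCALE so the default is never used
def scaleIdx (n : String) : Int := ((PySem.List.index? SCALE n).getD 0 : Nat)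

-- ===== PORT A =====
def note_midi (letter : String) (octave : Int) : Int :=
  (octave + 1) * 12 + NOTE_BASE.getD letter 0

def stepA (s : List (String × Int) × Int × Int) (note : String) :
    List (String × Int) × Int × Int :=
  let idx := scaleIdx note
  let octave := if s.2.2 ≠ -1 ∧ idx ≤ s.2.2 then s.2.1 + 1 else s.2.1
  (s.1 ++ [(note, octave)], octave, idx)

def assign_octaves (notes : List String) (base_octave : Int) : List (String × Int) :=
  (notes.foldl stepA ([], base_octave, -1)).1

def chord_midi_notes (lh_notes : List String) (rh_notes : List String) (trans : Option (List (String × String))) : List Int :=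
  let lh := match trans with
    | some t => if t ≠ [] then lh_notes.map (fun n => ((PySem.Dict.ofList t).get? n).getD "") else lh_notes
    | none => lh_notes
  let rh := match trans with
    | some t => if t ≠ [] then rh_notes.map (fun n => ((PySem.Dict.ofList t).get? n).getD "") else rh_notes
    | none => rh_notes
  let lh_oct := assign_octaves lh 3
  let last := (PySem.List.pyGet? lh_oct (-1)).getD ("", 0)      -- lh_oct[-1]; IndexError excluded by Pre_
  let first_rh_idx := scaleIdx ((PySem.List.pyGet? rh 0).getD "")  -- rh[0]; IndexError excluded by Pre_
  let last_lh_idx := scaleIdx last.1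
  let rh_base := if first_rh_idx > last_lh_idx then last.2 else last.2 + 1
  let rh_oct := assign_octaves rh rh_base
  (lh_oct ++ rh_oct).map (fun p => note_midi p.1 p.2)

-- ===== PORT B =====
def stepB (s : List Int × Int × Int) (note : String) : List Int × Int × Int :=
  let idx := scaleIdx note
  let octave := if s.2.2 ≠ -1 ∧ idx ≤ s.2.2 then s.2.1 + 1 else s.2.1
  (s.1 ++ [(octave + 1) * 12 + NOTE_BASE.getD note 0], octave, idx)

def chord_midi_notes_alt (lh_notes : List String) (rh_notes : List String) (trans : Option (List (String × String))) : List Int :=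
  let notes0 := lh_notes ++ rh_notes
  let notes := match trans with
    | some t => if t ≠ [] then notes0.map (fun n => ((PySem.Dict.ofList t).get? n).getD "") else notes0
    | none => notes0
  (notes.foldl stepB ([], 3, -1)).1

-- ===== PRECONDITION & SPEC =====
-- after translation the note exists and lies in SCALE (else Python raises KeyError/ValueError)
def preNote (trans : Option (List (String × String))) (n : String) : Bool :=
  match trans with
  | some t => if t = [] then SCALE.contains n
              else ((PySem.Dict.ofList t).get? n).any (fun m => SCALE.contains m)
  | none => SCALE.contains n

-- Pre_ excludes exactly the inputs where Python A raises: an empty hand (IndexError at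
-- lh_oct[-1] / rh[0]), a note missing from a nonempty trans (KeyError), or a translated
-- note not in SCALE (ValueError from SCALE.index).
def Pre_chord_midi_notes (lh_notes : List String) (rh_notes : List String) (trans : Option (List (String × String))) : Prop :=
  lh_notes ≠ [] ∧ rh_notes ≠ [] ∧ ((lh_notes ++ rh_notes).all (preNote trans)) = true
instance (lh_notes : List String) (rh_notes : List String) (trans : Option (List (String × String))) : Decidable (Pre_chord_midi_notes lh_notes rh_notes trans) := by unfold Pre_chord_midi_notes; infer_instance

def pvWitness_chord_midi_notes : List String × List String × (Option (List (String × String))) :=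
  (["C", "E"], ["G"], none)

def Spec_chord_midi_notes (lh_notes : List String) (rh_notes : List String) (trans : Option (List (String × String))) (out : List Int) : Prop := out = chord_midi_notes_alt lh_notes rh_notes trans
instance (lh_notes : List String) (rh_notes : List String) (trans : Option (List (String × String))) (out : List Int) : Decidable (Spec_chord_midi_notes lh_notes rh_notes trans out) := by unfold Spec_chord_midi_notes; infer_instance

-- ===== CLAIM (what is proved, stated in full; the proofs are below) =====
def Claim_equal_chord_midi_notes : Prop := ∀ (lh_notes : List String) (rh_notes : List String) (trans : Option (List (String × String))), Dom_chord_midi_notes lh_notes rh_notes trans → Pre_chord_midi_notes lh_notes rh_notes trans → Spec_chord_midi_notes lh_notes rh_notes trans (chord_midi_notes lh_notes rh_notes trans)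
-- ===== LEMMAS AND PROOFS =====

def midiOf (p : String × Int) : Int := (p.2 + 1) * 12 + NOTE_BASE.getD p.1 0

theorem scaleIdx_nonneg (n : String) : 0 ≤ scaleIdx n := Int.natCast_nonneg _

-- B's fold is A's fold with midiOf applied to the accumulator
theorem foldB_eq_foldA (notes : List String) :
    ∀ (acc : List (String × Int)) (o p : Int),
      notes.foldl stepB (acc.map midiOf, o, p) =
        ((notes.foldl stepA (acc, o, p)).1.map midiOf, (notes.foldl stepA (acc, o, p)).2) := by
  induction notes with
  | nil => intro acc o p; rfl
  | cons n ns ih =>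
    intro acc o p
    simp only [List.foldl_cons, stepA, stepB]
    rw [show (acc.map midiOf ++
        [((if p ≠ -1 ∧ scaleIdx n ≤ p then o + 1 else o) + 1) * 12 + NOTE_BASE.getD n 0]) =
        (acc ++ [(n, if p ≠ -1 ∧ scaleIdx n ≤ p then o + 1 else o)]).map midiOf by
      simp [midiOf]]
    exact ih _ _ _

-- the accumulator is only ever appended to; the rest of the state ignores it
theorem foldA_acc (notes : List String) :
    ∀ (acc : List (String × Int)) (o p : Int),
      notes.foldl stepA (acc, o, p) =
        (acc ++ (notes.foldl stepA ([], o, p)).1, (notes.foldl stepA ([], o, p)).2) := by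
  induction notes with
  | nil => intro acc o p; simp
  | cons n ns ih =>
    intro acc o p
    simp only [List.foldl_cons, stepA]
    rw [ih (acc ++ _), ih ([] ++ _)]
    simp

-- after a nonempty run, the last emitted pair carries the final octave, and the final
-- prev index is the SCALE index of its note
theorem foldA_last (notes : List String) :
    ∀ (acc : List (String × Int)) (o p : Int), notes ≠ [] →
      ∃ n, (notes.foldl stepA (acc, o, p)).1.getLast? =
              some (n, (notes.foldl stepA (acc, o, p)).2.1) ∧
           (notes.foldl stepA (acc, o, p)).2.2 = scaleIdx n := by
  induction notes with
  | nil => intro _ _ _ h; exact absurd rfl h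
  | cons m ms ih =>
    intro acc o p _
    cases ms with
    | nil => exact ⟨m, by simp [stepA], by simp [stepA]⟩
    | cons x xs =>
      simp only [List.foldl_cons, stepA]
      exact ih _ _ _ (by simp)

-- splicing: restarting the fold at rh_base with prev_idx = -1 is the same as continuing,
-- provided prev is the index of some note (hence ≥ 0)
theorem foldA_splice (rest : List String) (n0 nl : String) (acc : List (String × Int)) (o : Int) :
    (n0 :: rest).foldl stepA (acc, o, scaleIdx nl) =
      (acc ++ ((n0 :: rest).foldl stepA
          ([], if scaleIdx n0 > scaleIdx nl then o else o + 1, -1)).1,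
       ((n0 :: rest).foldl stepA
          ([], if scaleIdx n0 > scaleIdx nl then o else o + 1, -1)).2) := by
  have hn : scaleIdx nl ≠ -1 := by have := scaleIdx_nonneg nl; omega
  have hcond : (scaleIdx nl ≠ -1 ∧ scaleIdx n0 ≤ scaleIdx nl) ↔ ¬ scaleIdx n0 > scaleIdx nl := by
    constructor
    · rintro ⟨-, h⟩; omega
    · intro h; exact ⟨hn, by omega⟩
  simp only [List.foldl_cons, stepA]
  rw [if_neg (show ¬((-1 : Int) ≠ -1 ∧ scaleIdx n0 ≤ -1) from by simp)]
  simp only [hcond, ite_not]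
  rw [foldA_acc rest (acc ++ _), foldA_acc rest ([] ++ _)]
  simp

theorem map_translate_append (t : List (String × String)) (l r : List String) :
    (l ++ r).map (fun n => ((PySem.Dict.ofList t).get? n).getD "") =
      l.map (fun n => ((PySem.Dict.ofList t).get? n).getD "") ++
      r.map (fun n => ((PySem.Dict.ofList t).get? n).getD "") := List.map_append ..

-- the core equivalence, stated on the translated note lists
theorem core_eq (lh rh : List String) (hlh : lh ≠ []) (hrh : rh ≠ []) :
    (let lh_oct := assign_octaves lh 3
     let last := (PySem.List.pyGet? lh_oct (-1)).getD ("", 0)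
     let first_rh_idx := scaleIdx ((PySem.List.pyGet? rh 0).getD "")
     let last_lh_idx := scaleIdx last.1
     let rh_base := if first_rh_idx > last_lh_idx then last.2 else last.2 + 1
     (lh_oct ++ assign_octaves rh rh_base).map (fun p => note_midi p.1 p.2)) =
    ((lh ++ rh).foldl stepB ([], 3, -1)).1 := by
  obtain ⟨n0, rest, rfl⟩ : ∃ n0 rest, rh = n0 :: rest := by
    cases rh with | nil => exact absurd rfl hrh | cons a b => exact ⟨a, b, rfl⟩
  -- name A's lh fold state
  set s := lh.foldl stepA ([], (3 : Int), (-1 : Int)) with hs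
  obtain ⟨nl, hlast, hprev⟩ := foldA_last lh [] 3 (-1) hlh
  rw [← hs] at hlast hprev
  -- B's side
  have hB : ((lh ++ n0 :: rest).foldl stepB ([], 3, -1)).1 =
      ((lh ++ n0 :: rest).foldl stepA ([], 3, -1)).1.map midiOf := by
    have := foldB_eq_foldA (lh ++ n0 :: rest) [] 3 (-1)
    simp only [List.map_nil] at this
    rw [this]
  rw [hB, List.foldl_append, ← hs]
  -- A's side: unfold the lets
  show (assign_octaves lh 3 ++ assign_octaves (n0 :: rest) _).map (fun p => note_midi p.1 p.2) = _
  have hlh_oct : assign_octaves lh 3 = s.1 := rfl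
  have hlast' : PySem.List.pyGet? (assign_octaves lh 3) (-1) = some (nl, s.2.1) := by
    rw [PySem.List.pyGet?_neg_one, hlh_oct, hlast]
  have hrh0 : PySem.List.pyGet? (n0 :: rest) (0 : Int) = some n0 := by
    exact PySem.List.pyGet?_zero_cons ..
  rw [hlast', hrh0]
  simp only [Option.getD_some]
  -- rewrite A's continuation via the splice lemma
  have hsplit : (n0 :: rest).foldl stepA (s.1, s.2.1, s.2.2) =
      (s.1 ++ ((n0 :: rest).foldl stepA
          ([], if scaleIdx n0 > scaleIdx nl then s.2.1 else s.2.1 + 1, -1)).1,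
       ((n0 :: rest).foldl stepA
          ([], if scaleIdx n0 > scaleIdx nl then s.2.1 else s.2.1 + 1, -1)).2) := by
    rw [hprev]; exact foldA_splice rest n0 nl s.1 s.2.1
  have hstate : (s.1, s.2.1, s.2.2) = s := rfl
  rw [hstate] at hsplit
  rw [hsplit]
  simp only [assign_octaves, List.map_append, ← hs]
  rfl

-- ===== VERDICT (by name: the statement is the Claim_ definition above) =====
theorem chord_midi_notes_spec : Claim_equal_chord_midi_notes := by
  intro lh_notes rh_notes trans _ hpre
  obtain ⟨hlh, hrh, -⟩ := hpre
  show chord_midi_notes lh_notes rh_notes trans = chord_midi_notes_alt lh_notes rh_notes trans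
  unfold chord_midi_notes chord_midi_notes_alt
  cases trans with
  | none => exact core_eq lh_notes rh_notes hlh hrh
  | some t =>
    by_cases ht : t = []
    · simp only [ht, ne_eq, not_true_eq_false, if_false]
      exact core_eq lh_notes rh_notes hlh hrh
    · simp only [ht, ne_eq, not_false_eq_true, if_true, map_translate_append]
      exact core_eq _ _ (by simpa using hlh) (by simpa using hrh)
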